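-- pv_equiv track=rewrite | github.com/prashantkh19/DBSCAN_variant | DBSCAN_variant.py | check
-- ===== SOURCE A (Python) =====
-- def check(val, neighbors, dummy, distance, i):
--     if val in neighbors:
--         i = i+1
--         dummy2 = list(dummy)
--         dummy2.pop(val-i)
--         val = dummy2.index(distance) + 1 + i
--         val = check(val, neighbors, dummy2, distance, i)
--         return val
--     else:
--         return val
-- ===== SOURCE B (Python) =====
-- def check(val, neighbors, dummy, distance, i):
--     # Closed-form scan: after the first pop, each recursive step of A removes the
--     # first remaining occurrence of `distance` and maps the k-th occurrence at
--     # position p (in the once-popped list) to the candidate value p + i + 2;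
--     # the answer is the first such candidate not in `neighbors`.
--     if val not in neighbors:
--         return val
--     rest = list(dummy)
--     rest.pop(val - i - 1)
--     nb = set(neighbors)
--     for p, x in enumerate(rest):
--         if x == distance and p + i + 2 not in nb:
--             return p + i + 2
--     raise ValueError("%r is not in list" % (distance,))
-- ===== Notes on version B (the rewrite author's own statement) =====
-- stated objective: alternative
-- what changed: A's tail recursion (copy the list, pop, re-scan with .index, recurse) is replaced by a closed form: after the first pop, A's k-th step removes the first remaining occurrence of distance and the candidate produced for the occurrence at position p of the once-popped list is always p+i+2, so B does the single pop once and one linear scan returning the first such candidate not in a neighbor set.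
import Mathlib
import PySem

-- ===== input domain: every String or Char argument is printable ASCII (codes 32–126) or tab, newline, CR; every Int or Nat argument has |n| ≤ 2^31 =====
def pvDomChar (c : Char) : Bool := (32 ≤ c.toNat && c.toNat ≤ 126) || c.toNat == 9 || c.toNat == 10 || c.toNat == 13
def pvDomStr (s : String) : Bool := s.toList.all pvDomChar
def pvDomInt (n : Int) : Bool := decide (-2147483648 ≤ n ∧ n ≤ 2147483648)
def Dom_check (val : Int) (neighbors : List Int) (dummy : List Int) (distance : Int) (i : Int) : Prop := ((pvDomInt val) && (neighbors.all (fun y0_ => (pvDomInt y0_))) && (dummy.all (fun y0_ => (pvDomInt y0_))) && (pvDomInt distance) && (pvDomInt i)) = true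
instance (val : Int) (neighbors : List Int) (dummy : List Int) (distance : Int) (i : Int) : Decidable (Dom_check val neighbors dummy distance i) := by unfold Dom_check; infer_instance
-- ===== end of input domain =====

-- B replaces A's recursive copy/pop/re-scan chain by one linear scan over the once-popped
-- list (each recursive step of A removes the first remaining occurrence of `distance`,
-- and the candidate it produces for the occurrence at position p is always p + i + 2).

-- ===== PORT A =====
def check (val : Int) (neighbors : List Int) (dummy : List Int) (distance : Int) (i : Int) : Int :=
  if val ∈ neighbors then
    -- i = i+1; dummy2 = list(dummy); dummy2.pop(val-i)
    match h : PySem.List.pop? dummy (val - (i + 1)) with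
    | some r =>
      -- val = dummy2.index(distance) + 1 + i
      match PySem.List.index? r.2 distance with
      | some idx => check ((idx : Int) + 1 + (i + 1)) neighbors r.2 distance (i + 1)
      | none => 0     -- ValueError (excluded by Pre_check)
    | none => 0       -- IndexError (excluded by Pre_check)
  else val
termination_by dummy.length
decreasing_by
  have := PySem.List.length_of_pop?_eq_some dummy h
  omega

-- ===== PORT B =====
def check_alt (val : Int) (neighbors : List Int) (dummy : List Int) (distance : Int) (i : Int) : Int :=
  if val ∉ neighbors then val
  else
    match PySem.List.pop? dummy (val - i - 1) with
    | none => 0       -- IndexError (excluded by Pre_check)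
    | some r =>
      match (PySem.List.enumerate r.2).find?
          (fun q => q.2 == distance && ! PySem.Set.contains (PySem.Set.ofList neighbors) (q.1 + i + 2)) with
      | some q => q.1 + i + 2
      | none => 0     -- ValueError (excluded by Pre_check)

-- ===== PRECONDITION & SPEC =====
-- Pre_check is exactly where the Python A returns: either val ∉ neighbors (immediate return),
-- or the first pop index is valid and the popped list contains an occurrence of `distance`
-- at a position p with p + i + 2 ∉ neighbors (otherwise A ends in IndexError / ValueError).
def Pre_check (val : Int) (neighbors : List Int) (dummy : List Int) (distance : Int) (i : Int) : Prop :=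
  val ∉ neighbors ∨
  ((PySem.List.pop? dummy (val - i - 1)).any (fun r =>
      (PySem.List.enumerate r.2).any (fun q =>
        q.2 == distance && ! neighbors.contains (q.1 + i + 2)))) = true
instance (val : Int) (neighbors : List Int) (dummy : List Int) (distance : Int) (i : Int) : Decidable (Pre_check val neighbors dummy distance i) := by unfold Pre_check; infer_instance

def pvWitness_check : Int × List Int × List Int × Int × Int := (2, [2], [5, 7, 5], 5, 0)

def Spec_check (val : Int) (neighbors : List Int) (dummy : List Int) (distance : Int) (i : Int) (out : Int) : Prop := out = check_alt val neighbors dummy distance i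
instance (val : Int) (neighbors : List Int) (dummy : List Int) (distance : Int) (i : Int) (out : Int) : Decidable (Spec_check val neighbors dummy distance i out) := by unfold Spec_check; infer_instance

-- ===== CLAIM (what is proved, stated in full; the proofs are below) =====
def Claim_equal_check : Prop := ∀ (val : Int) (neighbors : List Int) (dummy : List Int) (distance : Int) (i : Int), Dom_check val neighbors dummy distance i → Pre_check val neighbors dummy distance i → Spec_check val neighbors dummy distance i (check val neighbors dummy distance i)

-- ===== LEMMAS AND PROOFS =====

-- Recursive reading of B's find?-scan (proof helper only).
def pvScan (d : List Int) (distance i : Int) (nbs : List Int) (p : Int) : Int :=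
  match d with
  | [] => 0
  | x :: t => if x = distance ∧ p + i + 2 ∉ nbs then p + i + 2 else pvScan t distance i nbs (p + 1)

theorem pvScan_cons (x : Int) (t : List Int) (distance i : Int) (nbs : List Int) (p : Int) :
    pvScan (x :: t) distance i nbs p =
      if x = distance ∧ p + i + 2 ∉ nbs then p + i + 2 else pvScan t distance i nbs (p + 1) := rfl

theorem pvScan_eq_find (d : List Int) (distance i : Int) (nbs : List Int) (p : Int) :
    (match (PySem.List.enumerate d p).find?
        (fun q => q.2 == distance && ! PySem.Set.contains (PySem.Set.ofList nbs) (q.1 + i + 2)) with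
      | some q => q.1 + i + 2
      | none => 0) = pvScan d distance i nbs p := by
  induction d generalizing p with
  | nil => simp [pvScan, PySem.List.enumerate_nil]
  | cons x t ih =>
    rw [PySem.List.enumerate_cons, List.find?_cons]
    by_cases hx : x = distance ∧ p + i + 2 ∉ nbs
    · have : (x == distance && ! PySem.Set.contains (PySem.Set.ofList nbs) (p + i + 2)) = true := by
        simp [hx.1, PySem.Set.mem_ofList]
        intro h; exact absurd h hx.2
      simp [pvScan, hx]
    · have : (x == distance && ! PySem.Set.contains (PySem.Set.ofList nbs) (p + i + 2)) = false := by
        by_cases h1 : x = distance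
        · have h2 : p + i + 2 ∈ nbs := by
            by_contra h2; exact hx ⟨h1, h2⟩
          simp [h1, PySem.Set.mem_ofList, h2]
        · simp [h1]
      simp only [this]
      rw [ih]
      simp [pvScan, hx]

theorem pvScan_zero_of_not_mem (d : List Int) (distance i : Int) (nbs : List Int) (p : Int)
    (h : distance ∉ d) : pvScan d distance i nbs p = 0 := by
  induction d generalizing p with
  | nil => rfl
  | cons x t ih =>
    simp at h
    rw [pvScan, if_neg (by rintro ⟨he, -⟩; exact h.1 he.symm)]
    exact ih (p + 1) h.2

theorem pvScan_append_of_not_mem (pre t : List Int) (distance i : Int) (nbs : List Int) (p : Int)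
    (h : distance ∉ pre) : pvScan (pre ++ t) distance i nbs p = pvScan t distance i nbs (p + pre.length) := by
  induction pre generalizing p with
  | nil => simp
  | cons x xs ih =>
    simp at h
    rw [List.cons_append, pvScan, if_neg (by simp [Ne.symm h.1]), ih _ h.2]
    congr 1
    push_cast [List.length_cons]
    ring

theorem pvScan_shift (d : List Int) (distance i : Int) (nbs : List Int) (p : Int) :
    pvScan d distance i nbs (p + 1) = pvScan d distance (i + 1) nbs p := by
  induction d generalizing p with
  | nil => rfl
  | cons x t ih =>
    rw [pvScan, pvScan, ih]
    have : p + 1 + i + 2 = p + (i + 1) + 2 := by ring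
    rw [this]

theorem index?_append_of_not_mem (pre t : List Int) (v : Int) (h : v ∉ pre) :
    PySem.List.index? (pre ++ t) v = (PySem.List.index? t v).map (· + pre.length) := by
  induction pre with
  | nil => simp [Option.map_id']
  | cons x xs ih =>
    simp at h
    rw [List.cons_append, PySem.List.index?_cons_of_ne (xs ++ t) (Ne.symm h.1), ih h.2]
    cases PySem.List.index? t v
    · simp
    · simp; omega

-- Core invariant: A's recursion from the state reached after one index() call equals B's scan.
theorem check_core (n : Nat) : ∀ (d : List Int) (distance i : Int) (neighbors : List Int) (idx : Nat),
    d.length ≤ n →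
    PySem.List.index? d distance = some idx →
    check ((idx : Int) + 1 + (i + 1)) neighbors d distance (i + 1) = pvScan d distance i neighbors 0 := by
  induction n with
  | zero =>
    intro d distance i neighbors idx hn hidx
    have : d = [] := List.length_eq_zero_iff.1 (Nat.le_zero.1 hn)
    subst this
    simp [PySem.List.index?_eq_idxOf?] at hidx
  | succ m ih =>
    intro d distance i neighbors idx hn hidx
    obtain ⟨pre, suf, hd, hlen, hpre⟩ := (PySem.List.index?_eq_some_iff _ _ _).1 hidx
    rw [check]
    by_cases hmem : (idx : Int) + 1 + (i + 1) ∈ neighbors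
    · rw [if_pos hmem]
      have hidxlt : idx < d.length := by
        subst hd; rw [List.length_append, List.length_cons]; omega
      have hpop : PySem.List.pop? d ((idx : Int) + 1 + (i + 1) - (i + 1 + 1)) = some (d[idx], d.eraseIdx idx) := by
        have : (idx : Int) + 1 + (i + 1) - (i + 1 + 1) = (idx : Nat) := by ring
        rw [this, PySem.List.pop?_natCast _ _ hidxlt]
      rw [hpop]
      dsimp only
      have herase : d.eraseIdx idx = pre ++ suf := by
        subst hd; rw [← hlen, List.eraseIdx_append_of_length_le (le_refl _)]
        simp
      have hrw : PySem.List.index? (d.eraseIdx idx) distance = (PySem.List.index? suf distance).map (· + idx) := by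
        rw [herase, index?_append_of_not_mem _ _ _ hpre, hlen]
      have hskip : ¬(distance = distance ∧ (0 : Int) + (pre.length : Int) + i + 2 ∉ neighbors) := by
        rintro ⟨-, hcon⟩
        apply hcon
        have h2 : (0 : Int) + (pre.length : Int) + i + 2 = (idx : Int) + 1 + (i + 1) := by
          rw [hlen]; ring
        rw [h2]; exact hmem
      cases hsuf : PySem.List.index? suf distance with
      | none =>
        rw [hrw, hsuf]
        simp only [Option.map_none]
        have hnm : distance ∉ suf := (PySem.List.index?_eq_none_iff _ _).1 hsuf
        subst hd
        rw [pvScan_append_of_not_mem _ _ _ _ _ _ hpre, pvScan_cons, if_neg hskip,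
            pvScan_zero_of_not_mem _ _ _ _ _ hnm]
      | some j =>
        rw [hrw, hsuf]
        simp only [Option.map_some]
        have hlen2 : (d.eraseIdx idx).length ≤ m := by
          rw [herase]
          subst hd
          simp at hn ⊢
          omega
        have := ih (d.eraseIdx idx) distance (i + 1) neighbors (j + idx) hlen2 (by rw [hrw, hsuf]; rfl)
        rw [this, herase]
        subst hd
        rw [pvScan_append_of_not_mem _ _ _ _ _ _ hpre, pvScan_append_of_not_mem _ _ _ _ _ _ hpre,
            pvScan_cons, if_neg hskip, pvScan_shift]
    · rw [if_neg hmem]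
      subst hd
      have htake : distance = distance ∧ (0 : Int) + (pre.length : Int) + i + 2 ∉ neighbors := by
        refine ⟨rfl, fun hcon => hmem ?_⟩
        have h2 : (idx : Int) + 1 + (i + 1) = 0 + (pre.length : Int) + i + 2 := by rw [hlen]; ring
        rw [h2]; exact hcon
      rw [pvScan_append_of_not_mem _ _ _ _ _ _ hpre, pvScan_cons, if_pos htake, hlen]
      ring

theorem check_eq_check_alt (val : Int) (neighbors : List Int) (dummy : List Int) (distance : Int) (i : Int) :
    check val neighbors dummy distance i = check_alt val neighbors dummy distance i := by
  rw [check, check_alt]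
  by_cases hmem : val ∈ neighbors
  · rw [if_pos hmem, if_neg (by simp [hmem])]
    have harg : val - (i + 1) = val - i - 1 := by ring
    cases hpop : PySem.List.pop? dummy (val - i - 1) with
    | none => rw [harg, hpop]
    | some r =>
      rw [harg, hpop]
      dsimp only
      rw [pvScan_eq_find r.2 distance i neighbors 0]
      cases hidx : PySem.List.index? r.2 distance with
      | none =>
        have hnm : distance ∉ r.2 := (PySem.List.index?_eq_none_iff _ _).1 hidx
        rw [pvScan_zero_of_not_mem _ _ _ _ _ hnm]
      | some idx =>
        exact check_core r.2.length r.2 distance i neighbors idx (le_refl _) hidx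
  · rw [if_neg hmem, if_pos (by simp [hmem])]

-- ===== VERDICT (by name: the statement is the Claim_ definition above) =====
theorem check_spec : Claim_equal_check := by
  intro val neighbors dummy distance i _ _
  unfold Spec_check
  exact check_eq_check_alt val neighbors dummy distance i
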